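-- pv_equiv track=rewrite | github.com/miztiik/yen-go | tools/ogs/organize_by_collection.py | assign_batches
-- ===== SOURCE A (Python) =====
-- def assign_batches(
--     collections: list[dict], batch_size: int
-- ) -> dict[str, list[tuple[str, dict]]]:
--     """Assign collections to tier/batch-NN directories.
--
--     Returns: {tier: [(batch_label, collection_record), ...]}
--     """
--     by_tier: dict[str, list[dict]] = {"premier": [], "curated": []}
--     for rec in collections:
--         tier = rec["quality_tier"]
--         if tier in by_tier:
--             by_tier[tier].append(rec)
--
--     result: dict[str, list[tuple[str, dict]]] = {}
--     for tier, recs in by_tier.items():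
--         assignments = []
--         for idx, rec in enumerate(recs):
--             batch_num = (idx // batch_size) + 1
--             batch_label = f"{batch_num:02d}"
--             assignments.append((batch_label, rec))
--         result[tier] = assignments
--
--     return result
-- ===== SOURCE B (Python) =====
-- def assign_batches(collections, batch_size):
--     """Declarative: per tier, filter matching records, then label them via enumerate."""
--     def label(tier):
--         recs = [r for r in collections if r["quality_tier"] == tier]
--         return [(f"{i // batch_size + 1:02d}", r) for i, r in enumerate(recs)]
--     return {tier: label(tier) for tier in ("premier", "curated")}
-- ===== Notes on version B (the rewrite author's own statement) =====
-- stated objective: simpler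
-- what changed: Replaces A's accumulator loops (append-into-dict grouping pass followed by an explicit enumerate loop building assignments) with a declarative per-tier decomposition: for each tier a filter comprehension selects its records and an enumerate comprehension attaches batch labels.
import Mathlib
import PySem

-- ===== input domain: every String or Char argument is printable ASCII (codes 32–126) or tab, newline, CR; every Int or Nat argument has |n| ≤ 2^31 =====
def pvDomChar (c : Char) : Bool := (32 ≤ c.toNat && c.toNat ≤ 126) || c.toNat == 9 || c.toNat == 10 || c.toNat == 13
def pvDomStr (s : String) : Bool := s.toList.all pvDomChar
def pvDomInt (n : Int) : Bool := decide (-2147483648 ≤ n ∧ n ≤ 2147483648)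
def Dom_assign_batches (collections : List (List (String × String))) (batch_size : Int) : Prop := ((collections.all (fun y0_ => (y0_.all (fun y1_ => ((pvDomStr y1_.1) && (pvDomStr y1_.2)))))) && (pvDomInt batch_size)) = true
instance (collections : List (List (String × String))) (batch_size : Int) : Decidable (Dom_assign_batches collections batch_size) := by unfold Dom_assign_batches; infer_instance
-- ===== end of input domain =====

-- B replaces A's accumulator loops (group-into-dict pass, then an explicit enumerate loop building
-- each tier's assignments) with a declarative per-tier decomposition: filter the tier's records,
-- then label them by mapping over enumerate. Equivalence of the return value on Pre_ (where A returns).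

-- f"{n:02d}": zero-pad to width 2 (only a single nonnegative digit gains a leading zero)
def pvFmt2 (n : Int) : String :=
  if 0 ≤ n ∧ n < 10 then "0" ++ PySem.Int.toStr n else PySem.Int.toStr n

-- ===== PORT A =====
-- rec["quality_tier"] (first-match lookup; "" only reached outside Pre_, where Python raises KeyError)
def pvGetTier (rec : List (String × String)) : String :=
  PySem.Dict.getD (PySem.Dict.mk rec) "quality_tier" ""

-- first loop of A: distribute records into by_tier = {"premier": [], "curated": []}
def pvStepA (pc : List (List (String × String)) × List (List (String × String)))
    (rec : List (String × String)) :
    List (List (String × String)) × List (List (String × String)) :=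
  let tier := pvGetTier rec
  if tier == "premier" then (pc.1 ++ [rec], pc.2)
  else if tier == "curated" then (pc.1, pc.2 ++ [rec])
  else pc

-- second loop of A over one tier: for idx, rec in enumerate(recs): append((f"{idx//bs+1:02d}", rec))
def pvAssignA (bs : Int) (idx : Int) : List (List (String × String)) → List (String × List (String × String))
  | [] => []
  | r :: rs => (pvFmt2 (PySem.Int.floordiv idx bs + 1), r) :: pvAssignA bs (idx + 1) rs

def assign_batches (collections : List (List (String × String))) (batch_size : Int) : List (String × List (String × (List (String × String)))) :=
  let by_tier := collections.foldl pvStepA ([], [])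
  [("premier", pvAssignA batch_size 0 by_tier.1), ("curated", pvAssignA batch_size 0 by_tier.2)]

-- ===== PORT B =====
-- label(tier): filter comprehension (r["quality_tier"] == tier) then enumerate comprehension
def pvLabelB (collections : List (List (String × String))) (bs : Int) (tier : String) :
    List (String × List (String × String)) :=
  let recs := collections.filter (fun r => pvGetTier r == tier)
  (PySem.List.enumerate recs).map (fun p => (pvFmt2 (PySem.Int.floordiv p.1 bs + 1), p.2))

def assign_batches_alt (collections : List (List (String × String))) (batch_size : Int) : List (String × List (String × (List (String × String)))) :=
  ["premier", "curated"].map (fun tier => (tier, pvLabelB collections batch_size tier))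

-- ===== PRECONDITION & SPEC =====
-- Pre_ = exactly where the Python A returns: every record has a "quality_tier" key (else KeyError),
-- and batch_size ≠ 0 unless no record lands in a tier (else ZeroDivisionError in the labelling loop).
def Pre_assign_batches (collections : List (List (String × String))) (batch_size : Int) : Prop :=
  (∀ rec ∈ collections, (PySem.Dict.get? (PySem.Dict.mk rec) "quality_tier").isSome = true) ∧
  (batch_size ≠ 0 ∨ ∀ rec ∈ collections, pvGetTier rec ≠ "premier" ∧ pvGetTier rec ≠ "curated")
instance (collections : List (List (String × String))) (batch_size : Int) : Decidable (Pre_assign_batches collections batch_size) := by unfold Pre_assign_batches; infer_instance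

def pvWitness_assign_batches : (List (List (String × String))) × Int :=
  ([[("quality_tier", "premier"), ("name", "a")], [("quality_tier", "curated")], [("quality_tier", "premier")]], 2)

def Spec_assign_batches (collections : List (List (String × String))) (batch_size : Int) (out : List (String × List (String × (List (String × String))))) : Prop := out = assign_batches_alt collections batch_size
instance (collections : List (List (String × String))) (batch_size : Int) (out : List (String × List (String × (List (String × String))))) : Decidable (Spec_assign_batches collections batch_size out) := by unfold Spec_assign_batches; infer_instance

-- ===== CLAIM (what is proved, stated in full; the proofs are below) =====
def Claim_equal_assign_batches : Prop := ∀ (collections : List (List (String × String))) (batch_size : Int), Dom_assign_batches collections batch_size → Pre_assign_batches collections batch_size → Spec_assign_batches collections batch_size (assign_batches collections batch_size)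

-- ===== LEMMAS AND PROOFS =====

-- A's grouping fold computes exactly the two filters (B's recs), for any accumulator
lemma pv_fold_filter :
    ∀ (l : List (List (String × String))) (p c : List (List (String × String))),
      l.foldl pvStepA (p, c) =
        (p ++ l.filter (fun r => pvGetTier r == "premier"),
         c ++ l.filter (fun r => pvGetTier r == "curated")) := by
  intro l
  induction l with
  | nil => intro p c; simp
  | cons rec l ih =>
      intro p c
      simp only [List.foldl_cons]
      by_cases hp : pvGetTier rec == "premier"
      · have hc : (pvGetTier rec == "curated") = false := by
          have := beq_iff_eq.mp hp; simp [this]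
        have : pvStepA (p, c) rec = (p ++ [rec], c) := by simp [pvStepA, hp]
        rw [this, ih]
        simp [hp, hc]
      · by_cases hc : pvGetTier rec == "curated"
        · have : pvStepA (p, c) rec = (p, c ++ [rec]) := by simp [pvStepA, hp, hc]
          rw [this, ih]
          simp [hp, hc]
        · have : pvStepA (p, c) rec = (p, c) := by simp [pvStepA, hp, hc]
          rw [this, ih]
          simp [hp, hc]

-- A's labelling recursion is B's map over enumerate (index generalized)
lemma pv_assign_eq_enum (bs : Int) :
    ∀ (xs : List (List (String × String))) (k : Int),
      pvAssignA bs k xs =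
        (PySem.List.enumerate xs k).map (fun p => (pvFmt2 (PySem.Int.floordiv p.1 bs + 1), p.2)) := by
  intro xs
  induction xs with
  | nil => intro k; simp [pvAssignA, PySem.List.enumerate_nil]
  | cons x xs ih => intro k; simp [pvAssignA, PySem.List.enumerate_cons, ih]

-- ===== VERDICT (by name: the statement is the Claim_ definition above) =====
theorem assign_batches_spec : Claim_equal_assign_batches := by
  intro collections batch_size _ _
  unfold Spec_assign_batches assign_batches assign_batches_alt pvLabelB
  rw [pv_fold_filter collections [] []]
  simp only [List.nil_append, List.map_cons, List.map_nil]
  rw [pv_assign_eq_enum, pv_assign_eq_enum]
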